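-- pv_equiv track=rewrite | github.com/boopompom/AirwaySeg | stat_helper.py | conf_matrix
-- ===== SOURCE A (Python) =====
-- def conf_matrix(class_labels_a, class_labels_p, actual, predicted):
--
--     class_count_a = len(class_labels_a)
--     class_count_p = len(class_labels_p)
--     total_examples = len(predicted)
--     row_count = class_count_a + 1
--     col_count = class_count_p + 1
--     matrix = [[0 for i in range(row_count)] for j in range(col_count)]
--     for idx, val in enumerate(actual):
--         a_i = actual[idx]
--         p_i = predicted[idx]
--         matrix[a_i][p_i] += 1
--         matrix[-1][p_i] += 1
--         matrix[a_i][-1] += 1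
--         matrix[-1][-1] += 1
--
--     return matrix
-- ===== SOURCE B (Python) =====
-- def conf_matrix(class_labels_a, class_labels_p, actual, predicted):
--     row_count = len(class_labels_a) + 1
--     col_count = len(class_labels_p) + 1
--     matrix = [[0] * row_count for _ in range(col_count)]
--     for a, p in zip(actual, predicted):
--         matrix[a][p] += 1
--     row_totals = [sum(row) for row in matrix]
--     col_totals = [sum(row[c] for row in matrix) for c in range(row_count)]
--     for r in range(col_count):
--         matrix[r][-1] += row_totals[r]
--     for c in range(row_count):
--         matrix[-1][c] += col_totals[c]
--     matrix[-1][-1] += len(actual)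
--     return matrix
-- ===== Notes on version B (the rewrite author's own statement) =====
-- stated objective: alternative
-- what changed: A maintains the three margins incrementally with four list updates per example; B increments only the core cell per example and afterwards adds the row totals, column totals and example count to the margin cells in separate aggregation passes over the finished core counts.
import Mathlib
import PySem

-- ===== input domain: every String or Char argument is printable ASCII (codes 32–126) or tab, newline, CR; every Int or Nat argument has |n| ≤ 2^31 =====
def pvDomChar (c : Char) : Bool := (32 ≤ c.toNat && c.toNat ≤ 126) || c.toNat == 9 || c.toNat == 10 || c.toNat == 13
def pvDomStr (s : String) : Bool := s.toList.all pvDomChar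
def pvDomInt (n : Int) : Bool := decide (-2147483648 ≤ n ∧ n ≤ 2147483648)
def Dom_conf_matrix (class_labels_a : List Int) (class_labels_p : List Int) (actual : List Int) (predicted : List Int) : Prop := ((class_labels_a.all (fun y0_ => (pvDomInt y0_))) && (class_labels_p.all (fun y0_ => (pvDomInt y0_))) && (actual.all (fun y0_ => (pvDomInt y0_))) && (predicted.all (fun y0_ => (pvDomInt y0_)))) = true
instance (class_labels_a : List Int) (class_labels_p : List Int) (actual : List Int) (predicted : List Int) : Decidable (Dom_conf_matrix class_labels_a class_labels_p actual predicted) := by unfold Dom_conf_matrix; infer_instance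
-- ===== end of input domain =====

-- B restructures A's incremental margin maintenance (four list updates per example) into a
-- single core-counting loop followed by margin-aggregation passes that add the row totals,
-- column totals and example count to the margin cells; objective: alternative decomposition,
-- no speed claim; return values proved equal on Pre_ (all inputs where A returns).

-- ===== PORT A =====
-- helper: the Python statement 'matrix[i][j] += 1' (Python index semantics, negative i/j from the end)
def cmBump (m : List (List Int)) (i j : Int) : List (List Int) :=
  PySem.List.pySetD m i (PySem.List.pySetD (PySem.List.pyGetD m i []) j (PySem.List.pyGetD (PySem.List.pyGetD m i []) j 0 + 1))


def conf_matrix (class_labels_a : List Int) (class_labels_p : List Int) (actual : List Int) (predicted : List Int) : List (List Int) :=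
  let class_count_a : Int := class_labels_a.length
  let class_count_p : Int := class_labels_p.length
  let row_count : Int := class_count_a + 1
  let col_count : Int := class_count_p + 1
  let matrix := (PySem.List.pyRange 0 col_count 1).map (fun _ => (PySem.List.pyRange 0 row_count 1).map (fun _ => (0 : Int)))
  (PySem.List.enumerate actual 0).foldl (fun matrix iv =>
      let a_i := PySem.List.pyGetD actual iv.1 0
      let p_i := PySem.List.pyGetD predicted iv.1 0
      let matrix := cmBump matrix a_i p_i
      let matrix := cmBump matrix (-1) p_i
      let matrix := cmBump matrix a_i (-1)
      cmBump matrix (-1) (-1)) matrix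


-- ===== PORT B =====
def conf_matrix_alt (class_labels_a : List Int) (class_labels_p : List Int) (actual : List Int) (predicted : List Int) : List (List Int) :=
  let row_count := class_labels_a.length + 1
  let col_count := class_labels_p.length + 1
  let matrix0 := (List.range col_count).map (fun _ => List.replicate row_count (0 : Int))
  let core := (actual.zip predicted).foldl (fun m q =>
      PySem.List.pySetD m q.1 (PySem.List.pySetD (PySem.List.pyGetD m q.1 []) q.2 (PySem.List.pyGetD (PySem.List.pyGetD m q.1 []) q.2 0 + 1))) matrix0
  let row_totals := core.map (fun row => row.sum)
  let col_totals := (List.range row_count).map (fun c => (core.map (fun row => row.getD c 0)).sum)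
  let m1 := (List.range col_count).foldl (fun m r =>
      m.set r (PySem.List.pySetD (m.getD r []) (-1)
        (PySem.List.pyGetD (m.getD r []) (-1) 0 + row_totals.getD r 0))) core
  let m2 := (List.range row_count).foldl (fun m c =>
      PySem.List.pySetD m (-1) ((PySem.List.pyGetD m (-1) []).set c
        ((PySem.List.pyGetD m (-1) []).getD c 0 + col_totals.getD c 0))) m1
  PySem.List.pySetD m2 (-1) (PySem.List.pySetD (PySem.List.pyGetD m2 (-1) []) (-1)
    (PySem.List.pyGetD (PySem.List.pyGetD m2 (-1) []) (-1) 0 + (actual.length : Int)))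


-- ===== PRECONDITION & SPEC =====
-- Pre_ is exactly the inputs on which A returns normally: len(actual) <= len(predicted) and every
-- label of a processed pair is a valid Python index into A's transposed matrix (negative indices
-- allowed); outside Pre_ A raises IndexError.
def Pre_conf_matrix (class_labels_a : List Int) (class_labels_p : List Int) (actual : List Int) (predicted : List Int) : Prop :=
  actual.length ≤ predicted.length ∧
  ∀ q ∈ actual.zip predicted,
    -((class_labels_p.length : Int) + 1) ≤ q.1 ∧ q.1 < (class_labels_p.length : Int) + 1 ∧
    -((class_labels_a.length : Int) + 1) ≤ q.2 ∧ q.2 < (class_labels_a.length : Int) + 1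

instance (class_labels_a : List Int) (class_labels_p : List Int) (actual : List Int) (predicted : List Int) : Decidable (Pre_conf_matrix class_labels_a class_labels_p actual predicted) := by unfold Pre_conf_matrix; infer_instance

def pvWitness_conf_matrix : List Int × List Int × List Int × List Int := ([5, 6], [7], [0, -1], [1, -2])

def Spec_conf_matrix (class_labels_a : List Int) (class_labels_p : List Int) (actual : List Int) (predicted : List Int) (out : List (List Int)) : Prop := out = conf_matrix_alt class_labels_a class_labels_p actual predicted
instance (class_labels_a : List Int) (class_labels_p : List Int) (actual : List Int) (predicted : List Int) (out : List (List Int)) : Decidable (Spec_conf_matrix class_labels_a class_labels_p actual predicted out) := by unfold Spec_conf_matrix; infer_instance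

-- ===== CLAIM (what is proved, stated in full; the proofs are below) =====
def Claim_equal_conf_matrix : Prop := ∀ (class_labels_a : List Int) (class_labels_p : List Int) (actual : List Int) (predicted : List Int), Dom_conf_matrix class_labels_a class_labels_p actual predicted → Pre_conf_matrix class_labels_a class_labels_p actual predicted → Spec_conf_matrix class_labels_a class_labels_p actual predicted (conf_matrix class_labels_a class_labels_p actual predicted)

-- ===== LEMMAS AND PROOFS =====
def nrm (n : Nat) (x : Int) : Nat := if 0 ≤ x then x.toNat else n - (-x).toNat


theorem pyIdx?_valid {n : Nat} {x : Int} (h : -(n : Int) ≤ x ∧ x < (n : Int)) :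
    PySem.List.pyIdx? n x = some (nrm n x) := by
  unfold PySem.List.pyIdx? nrm
  by_cases h0 : 0 ≤ x
  · rw [if_pos h0, if_pos (by omega), if_pos h0]
  · rw [if_neg h0, if_pos (by omega), if_neg h0]


theorem nrm_lt {n : Nat} {x : Int} (h : -(n : Int) ≤ x ∧ x < (n : Int)) : nrm n x < n := by
  unfold nrm
  split <;> omega


theorem pyGetD_idx {α : Type} {xs : List α} {d : α} {i : Int}
    (h : -(xs.length : Int) ≤ i ∧ i < (xs.length : Int)) :
    PySem.List.pyGetD xs i d = xs.getD (nrm xs.length i) d := by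
  have hn := nrm_lt h
  simp only [PySem.List.pyGetD, PySem.List.pyGet?, pyIdx?_valid h]
  simp [List.getD_eq_getElem?_getD, List.getElem?_eq_getElem hn]


theorem pySetD_idx {α : Type} {xs : List α} {v : α} {i : Int}
    (h : -(xs.length : Int) ≤ i ∧ i < (xs.length : Int)) :
    PySem.List.pySetD xs i v = xs.set (nrm xs.length i) v := by
  simp only [PySem.List.pySetD, PySem.List.pySet?, pyIdx?_valid h, Option.map_some, Option.getD_some]


def cmMk (R C : Nat) (f : Nat → Nat → Int) : List (List Int) :=
  (List.range R).map (fun r => (List.range C).map (fun c => f r c))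


theorem cmMk_length {R C : Nat} {f : Nat → Nat → Int} : (cmMk R C f).length = R := by
  simp [cmMk]


theorem cmMk_getD {R C : Nat} {f : Nat → Nat → Int} {i : Nat} (hi : i < R) :
    (cmMk R C f).getD i [] = (List.range C).map (f i) := by
  simp [cmMk, List.getD_eq_getElem?_getD, hi]


theorem map_range_getD {C j : Nat} {g : Nat → Int} (hj : j < C) :
    ((List.range C).map g).getD j 0 = g j := by
  simp [List.getD_eq_getElem?_getD, hj]


theorem map_range_set {α : Type} {C j : Nat} {g : Nat → α} {v : α} :
    ((List.range C).map g).set j v = (List.range C).map (fun c => if c = j then v else g c) := by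
  apply List.ext_getElem
  · simp
  · intro n h1 h2
    simp only [List.getElem_set, List.getElem_map, List.getElem_range]
    split <;> [skip; rw [if_neg (by omega)]] ; simp_all


theorem cmMk_congr {R C : Nat} {f g : Nat → Nat → Int}
    (h : ∀ r < R, ∀ c < C, f r c = g r c) : cmMk R C f = cmMk R C g := by
  unfold cmMk
  refine List.map_congr_left (fun r hr => ?_)
  exact List.map_congr_left (fun c hc => h r (List.mem_range.mp hr) c (List.mem_range.mp hc))


theorem cmMk_set {R C : Nat} {f : Nat → Nat → Int} {i : Nat} {g : Nat → Int} (hi : i < R) :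
    (cmMk R C f).set i ((List.range C).map g)
      = cmMk R C (fun r c => if r = i then g c else f r c) := by
  unfold cmMk
  rw [map_range_set]
  refine List.map_congr_left (fun r _ => ?_)
  by_cases h : r = i <;> simp [h]


theorem cmBump_mk {R C : Nat} {f : Nat → Nat → Int} {i j : Int}
    (hi : -(R : Int) ≤ i ∧ i < (R : Int)) (hj : -(C : Int) ≤ j ∧ j < (C : Int)) :
    cmBump (cmMk R C f) i j
      = cmMk R C (fun r c => f r c + if r = nrm R i ∧ c = nrm C j then 1 else 0) := by
  have hiR : nrm R i < R := nrm_lt hi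
  have hjC : nrm C j < C := nrm_lt hj
  have hlen : (cmMk R C f).length = R := cmMk_length
  have hi' : -((cmMk R C f).length : Int) ≤ i ∧ i < ((cmMk R C f).length : Int) := by rw [hlen]; exact hi
  unfold cmBump
  rw [pyGetD_idx hi', pySetD_idx hi', hlen, cmMk_getD hiR]
  have hrow : ((List.range C).map (f (nrm R i))).length = C := by simp
  have hj' : -(((List.range C).map (f (nrm R i))).length : Int) ≤ j ∧ j < (((List.range C).map (f (nrm R i))).length : Int) := by rw [hrow]; exact hj
  rw [pyGetD_idx hj', pySetD_idx hj', hrow, map_range_getD hjC, map_range_set, cmMk_set hiR]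
  apply cmMk_congr
  intro r hr c hc
  by_cases h1 : r = nrm R i <;> by_cases h2 : c = nrm C j <;> simp [h1, h2]

-- contribution of one example (already normalized to Nat cell indices) to A's cell (r,c)

def cmInd (R C : Nat) (na np : Nat) (r c : Nat) : Int :=
  (if r = na ∧ c = np then 1 else 0) + (if r = R - 1 ∧ c = np then 1 else 0)
    + (if r = na ∧ c = C - 1 then 1 else 0) + (if r = R - 1 ∧ c = C - 1 then 1 else 0)


def cmAf (R C : Nat) (l : List (Int × Int)) (r c : Nat) : Int :=
  (l.map (fun q => cmInd R C (nrm R q.1) (nrm C q.2) r c)).sum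


theorem nrm_neg_one {n : Nat} (hn : 0 < n) : nrm n (-1) = n - 1 := by
  unfold nrm
  rw [if_neg (by omega)]
  omega


theorem cmStep_mk {R C : Nat} {f : Nat → Nat → Int} {a p : Int}
    (hR : 0 < R) (hC : 0 < C)
    (ha : -(R : Int) ≤ a ∧ a < (R : Int)) (hp : -(C : Int) ≤ p ∧ p < (C : Int)) :
    cmBump (cmBump (cmBump (cmBump (cmMk R C f) a p) (-1) p) a (-1)) (-1) (-1)
      = cmMk R C (fun r c => f r c + cmInd R C (nrm R a) (nrm C p) r c) := by
  have hm1R : -(R : Int) ≤ -1 ∧ (-1 : Int) < (R : Int) := by omega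
  have hm1C : -(C : Int) ≤ -1 ∧ (-1 : Int) < (C : Int) := by omega
  rw [cmBump_mk ha hp, cmBump_mk hm1R hp, cmBump_mk ha hm1C, cmBump_mk hm1R hm1C,
    nrm_neg_one hR, nrm_neg_one hC]
  apply cmMk_congr
  intro r hr c hc
  unfold cmInd
  ring


theorem cm_foldA {R C : Nat} (hR : 0 < R) (hC : 0 < C) (l : List (Int × Int)) (f : Nat → Nat → Int)
    (hb : ∀ q ∈ l, -(R : Int) ≤ q.1 ∧ q.1 < (R : Int) ∧ -(C : Int) ≤ q.2 ∧ q.2 < (C : Int)) :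
    l.foldl (fun m q => cmBump (cmBump (cmBump (cmBump m q.1 q.2) (-1) q.2) q.1 (-1)) (-1) (-1)) (cmMk R C f)
      = cmMk R C (fun r c => f r c + cmAf R C l r c) := by
  induction l using List.reverseRecOn with
  | nil => simp [cmAf]
  | append_singleton t q ih =>
    rw [List.foldl_append, ih (fun x hx => hb x (by simp [hx]))]
    simp only [List.foldl_cons, List.foldl_nil]
    obtain ⟨h1, h2, h3, h4⟩ := hb q (by simp)
    rw [cmStep_mk hR hC ⟨h1, h2⟩ ⟨h3, h4⟩]
    apply cmMk_congr
    intro r hr c hc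
    simp [cmAf, add_assoc]


theorem cm_enum_fold_zip {σ : Type} (step : σ → Int → Int → σ) :
    ∀ (xs ys pxs pys : List Int) (init : σ), pxs.length = pys.length → xs.length ≤ ys.length →
    (PySem.List.enumerate xs (pxs.length : Int)).foldl
        (fun m iv => step m (PySem.List.pyGetD (pxs ++ xs) iv.1 0) (PySem.List.pyGetD (pys ++ ys) iv.1 0)) init
      = (xs.zip ys).foldl (fun m q => step m q.1 q.2) init := by
  intro xs
  induction xs with
  | nil => intro ys pxs pys init _ _; simp [PySem.List.enumerate_nil]
  | cons x xs ih =>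
    intro ys pxs pys init hlen hle
    cases ys with
    | nil => simp at hle
    | cons y ys =>
      rw [PySem.List.enumerate_cons]
      simp only [List.foldl_cons, List.zip_cons_cons]
      have gx : PySem.List.pyGetD (pxs ++ x :: xs) (pxs.length : Int) 0 = x := by
        rw [PySem.List.pyGetD_natCast]
        simp [List.getD_eq_getElem?_getD]
      have gy : PySem.List.pyGetD (pys ++ y :: ys) (pxs.length : Int) 0 = y := by
        rw [PySem.List.pyGetD_natCast, hlen]
        simp [List.getD_eq_getElem?_getD]
      rw [gx, gy]
      have e1 : ((pxs.length : Int) + 1) = (((pxs ++ [x]).length : Nat) : Int) := by simp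
      have e2 : pxs ++ x :: xs = (pxs ++ [x]) ++ xs := by simp
      have e3 : pys ++ y :: ys = (pys ++ [y]) ++ ys := by simp
      rw [e1, e2, e3]
      exact ih ys (pxs ++ [x]) (pys ++ [y]) (step init x y) (by simp [hlen]) (by simpa using hle)

-- B's core counting loop on a canonical matrix

def cmCnt (l : List (Int × Int)) (R C : Nat) (r c : Nat) : Int :=
  (l.map (fun q => if r = nrm R q.1 ∧ c = nrm C q.2 then (1 : Int) else 0)).sum


theorem cm_foldB {R C : Nat} (l : List (Int × Int)) (f : Nat → Nat → Int)
    (hb : ∀ q ∈ l, -(R : Int) ≤ q.1 ∧ q.1 < (R : Int) ∧ -(C : Int) ≤ q.2 ∧ q.2 < (C : Int)) :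
    l.foldl (fun m q =>
        PySem.List.pySetD m q.1 (PySem.List.pySetD (PySem.List.pyGetD m q.1 []) q.2 (PySem.List.pyGetD (PySem.List.pyGetD m q.1 []) q.2 0 + 1))) (cmMk R C f)
      = cmMk R C (fun r c => f r c + cmCnt l R C r c) := by
  induction l using List.reverseRecOn with
  | nil => simp [cmCnt]
  | append_singleton t q ih =>
    rw [List.foldl_append, ih (fun x hx => hb x (by simp [hx]))]
    simp only [List.foldl_cons, List.foldl_nil]
    obtain ⟨h1, h2, h3, h4⟩ := hb q (by simp)
    show cmBump _ q.1 q.2 = _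
    rw [cmBump_mk ⟨h1, h2⟩ ⟨h3, h4⟩]
    apply cmMk_congr
    intro r hr c hc
    simp [cmCnt, add_assoc]


theorem cm_rowpass {R C : Nat} (hC : 0 < C) (f : Nat → Nat → Int) (T : Nat → Int)
    (k : Nat) (hk : k ≤ R) :
    (List.range k).foldl
        (fun m r => m.set r (PySem.List.pySetD (m.getD r []) (-1)
          (PySem.List.pyGetD (m.getD r []) (-1) 0 + T r))) (cmMk R C f)
      = cmMk R C (fun r c => if r < k ∧ c = C - 1 then f r c + T r else f r c) := by
  induction k with
  | zero => simp
  | succ k ih =>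
    rw [List.range_succ, List.foldl_append, ih (by omega)]
    simp only [List.foldl_cons, List.foldl_nil]
    have hkR : k < R := by omega
    rw [cmMk_getD hkR]
    have hrow : (List.range C).map (fun c => if k < k ∧ c = C - 1 then f k c + T k else f k c)
        = (List.range C).map (f k) := by
      refine List.map_congr_left (fun c _ => ?_)
      simp
    rw [hrow]
    have hlen : ((List.range C).map (f k)).length = C := by simp
    have hb1 : -(((List.range C).map (f k)).length : Int) ≤ -1 ∧ (-1 : Int) < (((List.range C).map (f k)).length : Int) := by rw [hlen]; exact ⟨by omega, by omega⟩
    rw [pyGetD_idx hb1, pySetD_idx hb1, hlen, nrm_neg_one hC, map_range_getD (by omega), map_range_set, cmMk_set hkR]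
    apply cmMk_congr
    intro r hr c hc
    by_cases h1 : r = k
    · subst h1
      rw [if_pos rfl]
      by_cases h2 : c = C - 1
      · rw [if_pos h2, if_pos ⟨Nat.lt_succ_self r, h2⟩, h2]
      · rw [if_neg h2, if_neg (fun hx : r < r + 1 ∧ c = C - 1 => h2 hx.2)]
    · rw [if_neg h1]
      by_cases h2 : r < k ∧ c = C - 1
      · rw [if_pos h2, if_pos ⟨by omega, h2.2⟩]
      · rw [if_neg h2, if_neg (by omega)]


theorem cm_colpass {R C : Nat} (hR : 0 < R) (f : Nat → Nat → Int) (U : Nat → Int)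
    (k : Nat) (hk : k ≤ C) :
    (List.range k).foldl
        (fun m c => PySem.List.pySetD m (-1) ((PySem.List.pyGetD m (-1) []).set c
          ((PySem.List.pyGetD m (-1) []).getD c 0 + U c))) (cmMk R C f)
      = cmMk R C (fun r c => if r = R - 1 ∧ c < k then f r c + U c else f r c) := by
  induction k with
  | zero => simp
  | succ k ih =>
    rw [List.range_succ, List.foldl_append, ih (by omega)]
    simp only [List.foldl_cons, List.foldl_nil]
    have hkC : k < C := by omega
    have hlen : (cmMk R C (fun r c => if r = R - 1 ∧ c < k then f r c + U c else f r c)).length = R := cmMk_length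
    have hb1 : -((cmMk R C (fun r c => if r = R - 1 ∧ c < k then f r c + U c else f r c)).length : Int) ≤ -1 ∧ (-1 : Int) < ((cmMk R C (fun r c => if r = R - 1 ∧ c < k then f r c + U c else f r c)).length : Int) := by rw [hlen]; exact ⟨by omega, by omega⟩
    rw [pyGetD_idx hb1, pySetD_idx hb1, hlen, nrm_neg_one hR, cmMk_getD (by omega : R - 1 < R),
      map_range_getD hkC, map_range_set, cmMk_set (by omega : R - 1 < R)]
    apply cmMk_congr
    intro r hr c hc
    by_cases h1 : r = R - 1
    · subst h1
      by_cases h2 : c = k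
      · rw [if_pos rfl, if_pos h2, if_neg (show ¬(R - 1 = R - 1 ∧ k < k) by omega),
          if_pos (show R - 1 = R - 1 ∧ c < k + 1 from ⟨rfl, by omega⟩), h2]
      · by_cases h3 : c < k
        · rw [if_pos rfl, if_neg h2, if_pos (show R - 1 = R - 1 ∧ c < k from ⟨rfl, h3⟩),
            if_pos (show R - 1 = R - 1 ∧ c < k + 1 from ⟨rfl, by omega⟩)]
        · rw [if_pos rfl, if_neg h2, if_neg (show ¬(R - 1 = R - 1 ∧ c < k) by omega),
            if_neg (show ¬(R - 1 = R - 1 ∧ c < k + 1) by omega)]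
    · rw [if_neg h1, if_neg (by omega), if_neg (by omega)]


theorem cm_sum_ind {n k : Nat} (hk : k < n) :
    ((List.range n).map (fun r => if r = k then (1 : Int) else 0)).sum = 1 := by
  induction n with
  | zero => omega
  | succ n ih =>
    rw [List.range_succ, List.map_append, List.sum_append]
    by_cases h : k = n
    · have : ((List.range n).map (fun r => if r = k then (1 : Int) else 0)).sum = 0 := by
        have : ∀ r ∈ List.range n, (if r = k then (1 : Int) else 0) = 0 := by
          intro r hr
          rw [if_neg (by have := List.mem_range.mp hr; omega)]
        rw [List.map_congr_left this]
        simp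
      rw [this]
      simp [h.symm]
    · rw [ih (by omega)]
      simp [show ¬(n = k) from fun hh => h hh.symm]


theorem cm_col_tot {R C : Nat} (l : List (Int × Int)) {c : Nat}
    (hb : ∀ q ∈ l, -(R : Int) ≤ q.1 ∧ q.1 < (R : Int)) :
    ((List.range R).map (fun r => cmCnt l R C r c)).sum
      = (l.map (fun q => if c = nrm C q.2 then (1 : Int) else 0)).sum := by
  induction l with
  | nil => simp [cmCnt]
  | cons q t ih =>
    have hq := hb q (by simp)
    have hsplit : ((List.range R).map (fun r => cmCnt (q :: t) R C r c)).sum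
        = ((List.range R).map (fun r => if r = nrm R q.1 ∧ c = nrm C q.2 then (1 : Int) else 0)).sum
          + ((List.range R).map (fun r => cmCnt t R C r c)).sum := by
      rw [← PySem.List.sum_map_add_int]
      refine congrArg List.sum (List.map_congr_left (fun r _ => ?_))
      simp [cmCnt]
    rw [hsplit, ih (fun x hx => hb x (by simp [hx]))]
    simp only [List.map_cons, List.sum_cons]
    have hind : ((List.range R).map (fun r => if r = nrm R q.1 ∧ c = nrm C q.2 then (1 : Int) else 0)).sum
        = if c = nrm C q.2 then (1 : Int) else 0 := by
      by_cases hc2 : c = nrm C q.2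
      · rw [if_pos hc2]
        have he : ∀ r ∈ List.range R, (if r = nrm R q.1 ∧ c = nrm C q.2 then (1 : Int) else 0)
            = (if r = nrm R q.1 then (1 : Int) else 0) := by
          intro r _; simp [hc2]
        rw [List.map_congr_left he, cm_sum_ind (nrm_lt hq)]
      · rw [if_neg hc2]
        have he : ∀ r ∈ List.range R, (if r = nrm R q.1 ∧ c = nrm C q.2 then (1 : Int) else 0) = (0 : Int) := by
          intro r _; simp [hc2]
        rw [List.map_congr_left he]
        simp
    rw [hind]


theorem cm_row_tot {R C : Nat} (l : List (Int × Int)) {r : Nat}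
    (hb : ∀ q ∈ l, -(C : Int) ≤ q.2 ∧ q.2 < (C : Int)) :
    ((List.range C).map (fun c => cmCnt l R C r c)).sum
      = (l.map (fun q => if r = nrm R q.1 then (1 : Int) else 0)).sum := by
  induction l with
  | nil => simp [cmCnt]
  | cons q t ih =>
    have hq := hb q (by simp)
    have hsplit : ((List.range C).map (fun c => cmCnt (q :: t) R C r c)).sum
        = ((List.range C).map (fun c => if r = nrm R q.1 ∧ c = nrm C q.2 then (1 : Int) else 0)).sum
          + ((List.range C).map (fun c => cmCnt t R C r c)).sum := by
      rw [← PySem.List.sum_map_add_int]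
      refine congrArg List.sum (List.map_congr_left (fun c _ => ?_))
      simp [cmCnt]
    rw [hsplit, ih (fun x hx => hb x (by simp [hx]))]
    simp only [List.map_cons, List.sum_cons]
    have hind : ((List.range C).map (fun c => if r = nrm R q.1 ∧ c = nrm C q.2 then (1 : Int) else 0)).sum
        = if r = nrm R q.1 then (1 : Int) else 0 := by
      by_cases hr1 : r = nrm R q.1
      · rw [if_pos hr1]
        have he : ∀ c ∈ List.range C, (if r = nrm R q.1 ∧ c = nrm C q.2 then (1 : Int) else 0)
            = (if c = nrm C q.2 then (1 : Int) else 0) := by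
          intro c _; simp [hr1]
        rw [List.map_congr_left he, cm_sum_ind (nrm_lt hq)]
      · rw [if_neg hr1]
        have he : ∀ c ∈ List.range C, (if r = nrm R q.1 ∧ c = nrm C q.2 then (1 : Int) else 0) = (0 : Int) := by
          intro c _; simp [hr1]
        rw [List.map_congr_left he]
        simp
    rw [hind]


theorem cmAf_split {R C : Nat} (l : List (Int × Int)) (r c : Nat) :
    cmAf R C l r c
      = cmCnt l R C r c
        + (if r = R - 1 then (l.map (fun q => if c = nrm C q.2 then (1 : Int) else 0)).sum else 0)
        + (if c = C - 1 then (l.map (fun q => if r = nrm R q.1 then (1 : Int) else 0)).sum else 0)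
        + (if r = R - 1 ∧ c = C - 1 then (l.length : Int) else 0) := by
  induction l with
  | nil => simp [cmAf, cmCnt]
  | cons q t ih =>
    have hstep : cmAf R C (q :: t) r c = cmInd R C (nrm R q.1) (nrm C q.2) r c + cmAf R C t r c := by
      simp [cmAf]
    rw [hstep, ih]
    simp only [cmCnt, cmInd, List.map_cons, List.sum_cons, List.length_cons]
    push_cast
    split_ifs <;> omega


theorem cm_bounds (class_labels_a class_labels_p actual predicted : List Int)
    (h : Pre_conf_matrix class_labels_a class_labels_p actual predicted) :
    ∀ q ∈ actual.zip predicted,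
      -((class_labels_p.length + 1 : Nat) : Int) ≤ q.1 ∧ q.1 < ((class_labels_p.length + 1 : Nat) : Int) ∧
      -((class_labels_a.length + 1 : Nat) : Int) ≤ q.2 ∧ q.2 < ((class_labels_a.length + 1 : Nat) : Int) := by
  intro q hq
  obtain ⟨h1, h2, h3, h4⟩ := h.2 q hq
  exact ⟨by push_cast; omega, by push_cast; omega, by push_cast; omega, by push_cast; omega⟩


theorem conf_matrix_eq_mk (class_labels_a class_labels_p actual predicted : List Int)
    (h : Pre_conf_matrix class_labels_a class_labels_p actual predicted) :
    conf_matrix class_labels_a class_labels_p actual predicted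
      = cmMk (class_labels_p.length + 1) (class_labels_a.length + 1)
          (fun r c => cmAf (class_labels_p.length + 1) (class_labels_a.length + 1) (actual.zip predicted) r c) := by
  set R := class_labels_p.length + 1 with hR
  set C := class_labels_a.length + 1 with hC
  unfold conf_matrix
  simp only []
  have hinit : (PySem.List.pyRange 0 ((class_labels_p.length : Int) + 1) 1).map
        (fun _ => (PySem.List.pyRange 0 ((class_labels_a.length : Int) + 1) 1).map (fun _ => (0 : Int)))
      = cmMk R C (fun _ _ => 0) := by
    have e1 : ((class_labels_p.length : Int) + 1) = ((R : Nat) : Int) := by push_cast; omega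
    have e2 : ((class_labels_a.length : Int) + 1) = ((C : Nat) : Int) := by push_cast; omega
    rw [e1, e2]
    simp [cmMk, List.map_const', PySem.List.length_pyRange_one]
  rw [hinit]
  have hzip := cm_enum_fold_zip
    (fun m x y => cmBump (cmBump (cmBump (cmBump m x y) (-1) y) x (-1)) (-1) (-1))
    actual predicted [] [] (cmMk R C (fun _ _ => 0)) rfl h.1
  simp only [List.nil_append, List.length_nil, Nat.cast_zero] at hzip
  rw [hzip]
  rw [cm_foldA (by omega) (by omega) _ _ (cm_bounds _ _ _ _ h)]
  apply cmMk_congr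
  intro r hr c hc
  rw [← hR, ← hC]
  omega


theorem conf_matrix_alt_eq_mk (class_labels_a class_labels_p actual predicted : List Int)
    (h : Pre_conf_matrix class_labels_a class_labels_p actual predicted) :
    conf_matrix_alt class_labels_a class_labels_p actual predicted
      = cmMk (class_labels_p.length + 1) (class_labels_a.length + 1)
          (fun r c => cmAf (class_labels_p.length + 1) (class_labels_a.length + 1) (actual.zip predicted) r c) := by
  set R := class_labels_p.length + 1 with hR
  set C := class_labels_a.length + 1 with hC
  have hRpos : 0 < R := by omega
  have hCpos : 0 < C := by omega
  set l := actual.zip predicted with hl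
  have hb := cm_bounds _ _ _ _ h
  simp only [← hR, ← hC, ← hl] at hb
  have hb1 : ∀ q ∈ l, -(R : Int) ≤ q.1 ∧ q.1 < (R : Int) ∧ -(C : Int) ≤ q.2 ∧ q.2 < (C : Int) := hb
  unfold conf_matrix_alt
  simp only []
  simp only [← hR, ← hC, ← hl]
  have hinit : (List.range R).map (fun _ => List.replicate C (0 : Int)) = cmMk R C (fun _ _ => 0) := by
    simp [cmMk, List.map_const']
  rw [hinit, cm_foldB l _ hb1]
  have hcore : cmMk R C (fun r c => 0 + cmCnt l R C r c) = cmMk R C (fun r c => cmCnt l R C r c) :=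
    cmMk_congr (fun r _ c _ => by omega)
  rw [hcore]
  -- row totals read from the finished core
  have hrt : (cmMk R C (fun r c => cmCnt l R C r c)).map (fun row => row.sum)
      = (List.range R).map (fun r => ((List.range C).map (fun c => cmCnt l R C r c)).sum) := by
    simp [cmMk, Function.comp]
  rw [hrt]
  -- column totals read from the finished core
  have hct : (List.range C).map (fun c => ((cmMk R C (fun r c => cmCnt l R C r c)).map (fun row => row.getD c 0)).sum)
      = (List.range C).map (fun c => ((List.range R).map (fun r => cmCnt l R C r c)).sum) := by
    refine List.map_congr_left (fun c hcm => ?_)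
    have hc : c < C := List.mem_range.mp hcm
    congr 1
    simp only [cmMk, List.map_map, Function.comp]
    exact List.map_congr_left (fun r _ => map_range_getD hc)
  rw [hct]
  rw [cm_rowpass hCpos _ _ R (Nat.le_refl R), cm_colpass hRpos _ _ C (Nat.le_refl C)]
  -- final corner update
  set G2 := fun (r c : Nat) =>
      (if r = R - 1 ∧ c < C then (if r < R ∧ c = C - 1 then cmCnt l R C r c + ((List.range R).map (fun r' => ((List.range C).map (fun c' => cmCnt l R C r' c')).sum)).getD r 0 else cmCnt l R C r c) + ((List.range C).map (fun c' => ((List.range R).map (fun r' => cmCnt l R C r' c')).sum)).getD c 0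
      else (if r < R ∧ c = C - 1 then cmCnt l R C r c + ((List.range R).map (fun r' => ((List.range C).map (fun c' => cmCnt l R C r' c')).sum)).getD r 0 else cmCnt l R C r c)) with hG2
  have hmlen : (cmMk R C G2).length = R := cmMk_length
  have hbm : -((cmMk R C G2).length : Int) ≤ -1 ∧ (-1 : Int) < ((cmMk R C G2).length : Int) := by
    rw [hmlen]; exact ⟨by omega, by omega⟩
  rw [pyGetD_idx hbm, pySetD_idx hbm, hmlen, nrm_neg_one hRpos, cmMk_getD (show R - 1 < R by omega)]
  have hrowlen : ((List.range C).map (G2 (R - 1))).length = C := by simp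
  have hbr : -(((List.range C).map (G2 (R - 1))).length : Int) ≤ -1 ∧ (-1 : Int) < (((List.range C).map (G2 (R - 1))).length : Int) := by
    rw [hrowlen]; exact ⟨by omega, by omega⟩
  rw [pyGetD_idx hbr, pySetD_idx hbr, hrowlen, nrm_neg_one hCpos,
    map_range_getD (show C - 1 < C by omega), map_range_set, cmMk_set (show R - 1 < R by omega)]
  apply cmMk_congr
  intro r hr c hc
  have hbA : ∀ q ∈ l, -(R : Int) ≤ q.1 ∧ q.1 < (R : Int) := fun q hq => ⟨(hb1 q hq).1, (hb1 q hq).2.1⟩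
  have hbP : ∀ q ∈ l, -(C : Int) ≤ q.2 ∧ q.2 < (C : Int) := fun q hq => ⟨(hb1 q hq).2.2.1, (hb1 q hq).2.2.2⟩
  have hT : ∀ r' : Nat, r' < R → ((List.range R).map (fun r'' => ((List.range C).map (fun c' => cmCnt l R C r'' c')).sum)).getD r' 0
      = (l.map (fun q => if r' = nrm R q.1 then (1 : Int) else 0)).sum := by
    intro r' hr'
    rw [map_range_getD hr', cm_row_tot l hbP]
  have hU : ∀ c' : Nat, c' < C → ((List.range C).map (fun c'' => ((List.range R).map (fun r' => cmCnt l R C r' c'')).sum)).getD c' 0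
      = (l.map (fun q => if c' = nrm C q.2 then (1 : Int) else 0)).sum := by
    intro c' hc'
    rw [map_range_getD hc', cm_col_tot l hbA]
  have hN : (l.length : Int) = (actual.length : Int) := by
    rw [hl, List.length_zip, Nat.min_eq_left h.1]
  rw [cmAf_split]
  simp only [hG2]
  rw [hT r hr, hU c hc, hT (R - 1) (by omega), hU (C - 1) (by omega), ← hN]
  by_cases h1 : r = R - 1 <;> by_cases h2 : c = C - 1
  · subst h1; subst h2; split_ifs <;> (try simp only [and_true, true_and] at *) <;> first | omega | simp_all
  · subst h1; split_ifs <;> (try simp only [and_true, true_and] at *) <;> first | omega | simp_all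
  · subst h2; split_ifs <;> (try simp only [and_true, true_and] at *) <;> first | omega | simp_all
  · split_ifs <;> (try simp only [and_true, true_and] at *) <;> first | omega | simp_all

-- ===== VERDICT (by name: the statement is the Claim_ definition above) =====
theorem conf_matrix_spec : Claim_equal_conf_matrix := by
  intro cla clp actual predicted _hD hP
  unfold Spec_conf_matrix
  rw [conf_matrix_eq_mk cla clp actual predicted hP, conf_matrix_alt_eq_mk cla clp actual predicted hP]
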